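-- pv_equiv track=rewrite | github.com/HassanAli112006/DSA | Sliding_window/count_all_even_subarrays_k_brute.py | count_even_subarrays
-- ===== SOURCE A (Python) =====
-- def count_even_subarrays(number, ws):
--     n = len(number)
--     count = 0
--     true_count = 0
--     valid = False
--
--     # First window check
--     sub_array = number[:ws]
--     for x in sub_array:
--         if x % 2 == 0:
--             true_count += 1
--         if true_count == ws:
--             valid = True
--     if valid:
--         count += 1
--
--     # Sliding window (brute-force rechecking)
--     for i in range(1, n - ws + 1):
--         true_count = 0
--         valid = False
--         sub_array = number[i:i + ws]
--         for x in sub_array: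
--             if x % 2 == 0:
--                 true_count += 1
--             if true_count == ws:
--                 valid = True
--         if valid:
--             count += 1
--
--     return count
-- ===== SOURCE B (Python) =====
-- def count_even_subarrays(number, ws):
--     # One pass: maintain the length of the current run of consecutive even
--     # elements; every position where the run reaches ws ends one valid window.
--     if ws <= 0:
--         return 0
--     count = 0
--     streak = 0
--     for x in number:
--         streak = streak + 1 if x % 2 == 0 else 0
--         if streak >= ws:
--             count += 1
--     return count
-- ===== Notes on version B (the rewrite author's own statement) =====
-- stated objective: faster
-- what changed: Replaces the per-window rechecking loop (slice + inner scan for every window) by a single pass that tracks the length of the current run of consecutive even elements and counts positions where the run reaches ws.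
import Mathlib
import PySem

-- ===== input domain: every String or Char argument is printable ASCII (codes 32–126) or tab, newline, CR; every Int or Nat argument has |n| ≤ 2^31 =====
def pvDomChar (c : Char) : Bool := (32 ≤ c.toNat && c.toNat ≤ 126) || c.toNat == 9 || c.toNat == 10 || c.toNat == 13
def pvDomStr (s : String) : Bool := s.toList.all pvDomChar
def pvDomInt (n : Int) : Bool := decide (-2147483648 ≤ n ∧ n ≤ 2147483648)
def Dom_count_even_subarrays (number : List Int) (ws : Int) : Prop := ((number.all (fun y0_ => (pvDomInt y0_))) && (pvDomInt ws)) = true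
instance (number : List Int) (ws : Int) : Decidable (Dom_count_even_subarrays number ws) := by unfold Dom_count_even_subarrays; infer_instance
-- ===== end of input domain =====

-- B replaces A's per-window slice-and-rescan by a single pass tracking the run of
-- consecutive even elements (objective: faster).

-- ===== PORT A =====
-- the inner "for x in sub_array" check, shared verbatim by A's two loops
def pvWindowCheck (ws : Int) (sub : List Int) : Int × Bool :=
  sub.foldl (fun (st : Int × Bool) x =>
    let tc := if PySem.Int.mod x 2 == 0 then st.1 + 1 else st.1
    (tc, if tc == ws then true else st.2)) (0, false)

def count_even_subarrays (number : List Int) (ws : Int) : Int :=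
  let n : Int := number.length
  let firstState := pvWindowCheck ws (PySem.List.slice number none (some ws))
  let count : Int := if firstState.2 then 0 + 1 else 0
  (PySem.List.pyRange 1 (n - ws + 1) 1).foldl (fun count i =>
    let st := pvWindowCheck ws (PySem.List.slice number (some i) (some (i + ws)))
    if st.2 then count + 1 else count) count

-- ===== PORT B =====
def count_even_subarrays_alt (number : List Int) (ws : Int) : Int :=
  if ws ≤ 0 then 0
  else
    (number.foldl (fun (st : Int × Int) x =>
      let streak := if PySem.Int.mod x 2 == 0 then st.2 + 1 else 0
      (if streak ≥ ws then st.1 + 1 else st.1, streak)) (0, 0)).1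

-- ===== PRECONDITION & SPEC =====
def Spec_count_even_subarrays (number : List Int) (ws : Int) (out : Int) : Prop := out = count_even_subarrays_alt number ws
instance (number : List Int) (ws : Int) (out : Int) : Decidable (Spec_count_even_subarrays number ws out) := by unfold Spec_count_even_subarrays; infer_instance

-- ===== CLAIM (what is proved, stated in full; the proofs are below) =====
def Claim_equal_count_even_subarrays : Prop := ∀ (number : List Int) (ws : Int), Dom_count_even_subarrays number ws → Spec_count_even_subarrays number ws (count_even_subarrays number ws)

-- ===== LEMMAS AND PROOFS =====

def pvEven (x : Int) : Bool := PySem.Int.mod x 2 == 0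
def pvAllEven (l : List Int) : Bool := l.all pvEven
-- the length of the trailing run of even elements, exactly as B's streak computes it
def pvRun (l : List Int) : Nat := l.foldl (fun s x => if pvEven x then s + 1 else 0) 0

-- once A's valid flag is true it stays true
theorem pvWindowCheck_true (ws : Int) : ∀ (sub : List Int) (t : Int),
    (sub.foldl (fun (st : Int × Bool) x =>
      ((if PySem.Int.mod x 2 == 0 then st.1 + 1 else st.1),
       if (if PySem.Int.mod x 2 == 0 then st.1 + 1 else st.1) == ws then true else st.2)) (t, true)).2 = true := by
  intro sub
  induction sub with
  | nil => intro t; rfl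
  | cons x xs ih =>
      intro t
      simp only [List.foldl_cons, ite_self]
      exact ih _

-- the inner scan never validates when ws < 0
theorem pvWindowCheck_neg (ws : Int) (hws : ws < 0) : ∀ (sub : List Int) (t : Int), 0 ≤ t →
    (sub.foldl (fun (st : Int × Bool) x =>
      ((if PySem.Int.mod x 2 == 0 then st.1 + 1 else st.1),
       if (if PySem.Int.mod x 2 == 0 then st.1 + 1 else st.1) == ws then true else st.2)) (t, false)).2 = false := by
  intro sub
  induction sub with
  | nil => intro t _; rfl
  | cons x xs ih =>
      intro t ht
      simp only [List.foldl_cons]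
      have h1 : 0 ≤ (if PySem.Int.mod x 2 == 0 then t + 1 else t) := by
        split <;> omega
      have h2 : ((if PySem.Int.mod x 2 == 0 then t + 1 else t) == ws) = false := by
        simp only [beq_eq_false_iff_ne]; omega
      simp only [h2, Bool.false_eq_true, reduceIte]
      exact ih _ h1

-- characterization of the inner scan for positive ws on a window of length ≤ ws
theorem pvWindowCheck_snd (w : Nat) : ∀ (sub : List Int) (tc : Nat), tc < w → tc + sub.length ≤ w →
    (sub.foldl (fun (st : Int × Bool) x =>
      ((if PySem.Int.mod x 2 == 0 then st.1 + 1 else st.1),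
       if (if PySem.Int.mod x 2 == 0 then st.1 + 1 else st.1) == (w : Int) then true else st.2)) ((tc : Int), false)).2
    = (decide (tc + sub.length = w) && pvAllEven sub) := by
  intro sub
  induction sub with
  | nil =>
      intro tc h1 _
      simp only [List.foldl_nil, pvAllEven, List.all_nil, List.length_nil, Bool.and_true, Nat.add_zero]
      simp [Nat.ne_of_lt h1]
  | cons x xs ih =>
      intro tc h1 h2
      simp only [List.foldl_cons]
      by_cases he : pvEven x
      · have he' : (PySem.Int.mod x 2 == 0) = true := he
        simp only [he', if_true]
        by_cases hh : tc + 1 = w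
        · have hb : ((tc : Int) + 1 == (w : Int)) = true := by
            simp; exact_mod_cast hh
          simp only [hb, if_true]
          rw [pvWindowCheck_true]
          have hxs : xs = [] := by
            have : xs.length = 0 := by simp [List.length_cons] at h2; omega
            exact List.eq_nil_of_length_eq_zero this
          subst hxs
          simp [pvAllEven, he, hh]
        · have hne : ((tc : Int) + 1 == (w : Int)) = false := by
            simp only [beq_eq_false_iff_ne]
            intro hc; apply hh; exact_mod_cast hc
          simp only [hne, Bool.false_eq_true, reduceIte]
          have hcast : ((tc : Int) + 1) = ((tc + 1 : Nat) : Int) := by push_cast; ring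
          rw [hcast, ih (tc + 1) (by omega) (by simp at h2 ⊢; omega)]
          simp only [pvAllEven, List.all_cons, he, Bool.true_and, List.length_cons]
          have hdc : decide (tc + 1 + xs.length = w) = decide (tc + (xs.length + 1) = w) := by
            simp only [decide_eq_decide]; omega
          rw [hdc]
          rfl
      · have he' : (PySem.Int.mod x 2 == 0) = false := by simpa [pvEven] using he
        simp only [he', Bool.false_eq_true, reduceIte]
        have hne : ((tc : Int) == (w : Int)) = false := by
          simp only [beq_eq_false_iff_ne]
          exact_mod_cast Nat.ne_of_lt h1
        simp only [hne, Bool.false_eq_true, reduceIte]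
        rw [ih tc h1 (by simp only [List.length_cons] at h2; omega)]
        have hd : decide (tc + xs.length = w) = false := by
          simp only [List.length_cons] at h2
          simp only [decide_eq_false_iff_not]; omega
        simp [pvAllEven, he, hd]

-- bridge to the port's helper
theorem pvWindowCheck_spec (w : Nat) (hw : 0 < w) (sub : List Int) (hlen : sub.length ≤ w) :
    (pvWindowCheck (w : Int) sub).2 = (decide (sub.length = w) && pvAllEven sub) := by
  unfold pvWindowCheck
  simpa using pvWindowCheck_snd w sub 0 hw (by omega)

theorem pvWindowCheck_nonpos (ws : Int) (hws : ws < 0) (sub : List Int) :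
    (pvWindowCheck ws sub).2 = false := by
  unfold pvWindowCheck
  simpa using pvWindowCheck_neg ws hws sub 0 le_rfl

theorem pvA_nonpos (number : List Int) (ws : Int) (hws : ws ≤ 0) :
    count_even_subarrays number ws = 0 := by
  unfold count_even_subarrays
  dsimp only
  rcases lt_or_eq_of_le hws with hlt | heq
  · have h1 : (pvWindowCheck ws (PySem.List.slice number none (some ws))).2 = false :=
      pvWindowCheck_nonpos ws hlt _
    rw [h1]
    simp only [Bool.false_eq_true, reduceIte]
    rw [PySem.List.foldl_congr_mem' _ _ (fun (c : Int) _ => c) _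
      (by intro i _ c; rw [pvWindowCheck_nonpos ws hlt]; simp)]
    exact PySem.List.foldl_ignore _ _
  · subst heq
    have hslice : PySem.List.slice number none (some (0:Int)) = [] := by
      rw [PySem.List.slice_to number (by norm_num)]; simp
    rw [hslice]
    simp only [pvWindowCheck, List.foldl_nil, Bool.false_eq_true, reduceIte]
    rw [PySem.List.foldl_congr_mem' _ _ (fun (c : Int) _ => c) _
      (by
        intro i hi c
        have h1 : 1 ≤ i := (PySem.List.mem_pyRange_one.mp hi).1
        have hsl : PySem.List.slice number (some i) (some (i + 0)) = [] := by
          rw [PySem.List.slice_toNat number (by omega) (by omega)]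
          simp
        rw [hsl]
        simp)]
    exact PySem.List.foldl_ignore _ _

theorem pvA_eq (number : List Int) (w : Nat) (hw : 0 < w) :
    count_even_subarrays number (w : Int)
    = ((List.range (number.length + 1 - w)).countP
        (fun i => pvAllEven ((number.drop i).take w)) : Int) := by
  unfold count_even_subarrays
  dsimp only
  rw [PySem.List.slice_to_natCast]
  rw [pvWindowCheck_spec w hw _ (by rw [List.length_take]; omega)]
  rw [PySem.List.foldl_congr_mem' _ _
      (fun (c : Int) i => if pvAllEven ((number.drop i.toNat).take w) then c + 1 else c) _
      (by
        intro i hi c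
        obtain ⟨h1, h2⟩ := PySem.List.mem_pyRange_one.mp hi
        have hiw : i.toNat + w ≤ number.length := by omega
        have hi0 : (0:Int) ≤ i := by omega
        have hsl : PySem.List.slice number (some i) (some (i + (w:Int)))
            = (number.drop i.toNat).take w := by
          conv_lhs => rw [show i = ((i.toNat : Nat) : Int) from (Int.toNat_of_nonneg hi0).symm]
          exact PySem.List.slice_natCast_add number i.toNat w
        rw [hsl]
        rw [pvWindowCheck_spec w hw _ (by rw [List.length_take]; omega)]
        have hlen : ((number.drop i.toNat).take w).length = w := by
          rw [List.length_take, List.length_drop]; omega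
        rw [hlen]
        simp)]
  rw [PySem.List.foldl_if_add_one]
  rw [PySem.List.pyRange_one]
  rw [List.countP_map]
  rw [show (↑number.length - (w:Int) + 1 - 1) = ↑number.length - (w:Int) by ring]
  rw [show ((↑number.length - (w:Int))).toNat = number.length - w from by omega]
  by_cases hcase : w ≤ number.length
  · have hsplit : number.length + 1 - w = (number.length - w) + 1 := by omega
    rw [hsplit, List.range_succ_eq_map, List.countP_cons, List.countP_map]
    have hfirst : (decide ((number.take w).length = w) && pvAllEven (number.take w))
        = pvAllEven (number.take w) := by
      rw [List.length_take]
      simp [Nat.min_eq_left hcase]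
    rw [hfirst]
    have hcomp : List.countP ((fun (i : Int) => pvAllEven ((number.drop i.toNat).take w)) ∘ (fun (k : Nat) => (1:Int) + (k:Int)))
          (List.range (number.length - w))
        = List.countP ((fun i => pvAllEven ((number.drop i).take w)) ∘ Nat.succ)
          (List.range (number.length - w)) := by
      apply List.countP_congr
      intro a _
      have h1a : ((1:Int) + (a:Int)).toNat = Nat.succ a := by omega
      simp [Function.comp, h1a]
    rw [hcomp]
    push_cast
    by_cases hz : pvAllEven (number.take w) = true
    · simp only [hz, List.drop_zero, if_true]
      ring
    · have hz' : pvAllEven (number.take w) = false := by simpa using hz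
      simp only [hz', Bool.false_eq_true, reduceIte, List.drop_zero]
      ring
  · have h0 : number.length - w = 0 := by omega
    have h1 : number.length + 1 - w = 0 := by omega
    rw [h0, h1]
    have hfirst : (decide ((number.take w).length = w) && pvAllEven (number.take w)) = false := by
      rw [List.length_take]
      simp; omega
    rw [hfirst]
    simp

theorem pvRun_append_singleton (l : List Int) (x : Int) :
    pvRun (l ++ [x]) = if pvEven x then pvRun l + 1 else 0 := by
  simp [pvRun, List.foldl_append]

-- B's streak reaches w exactly when the last w elements exist and are all even
theorem pvRun_ge_iff (w : Nat) (hw : 0 < w) (l : List Int) :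
    (w ≤ pvRun l) ↔ (w ≤ l.length ∧ pvAllEven (l.drop (l.length - w)) = true) := by
  induction l using List.reverseRecOn generalizing w with
  | nil => simp [pvRun]; omega
  | append_singleton l x ih =>
      rw [pvRun_append_singleton]
      have hlen : (l ++ [x]).length = l.length + 1 := by simp
      have hstep : ∀ v : Nat, 0 < v → v ≤ l.length + 1 →
          (l ++ [x]).drop ((l ++ [x]).length - v) = l.drop (l.length - (v - 1)) ++ [x] := by
        intro v hv1 hv2
        have h1 : (l ++ [x]).length - v = l.length - (v - 1) := by rw [hlen]; omega
        rw [h1, List.drop_append_of_le_length (by omega)]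
      by_cases he : pvEven x
      · simp only [he, if_true]
        by_cases h1 : w = 1
        · subst h1
          have hd := hstep 1 (by omega) (by omega)
          rw [hd]
          simp [pvAllEven, he, hlen]
        · have hw2 : 2 ≤ w := by omega
          constructor
          · intro h
            have hr : w - 1 ≤ pvRun l := by omega
            obtain ⟨ha, hb⟩ := (ih (w - 1) (by omega)).mp hr
            have hle : w ≤ l.length + 1 := by omega
            refine ⟨by rw [hlen]; omega, ?_⟩
            rw [hstep w (by omega) hle]
            simp [pvAllEven] at hb ⊢
            exact ⟨hb, he⟩
          · rintro ⟨ha, hb⟩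
            rw [hlen] at ha
            rw [hstep w (by omega) ha] at hb
            simp [pvAllEven] at hb
            have : w - 1 ≤ pvRun l := (ih (w - 1) (by omega)).mpr ⟨by omega, by simp [pvAllEven]; exact hb.1⟩
            omega
      · have he' : pvEven x = false := by simpa using he
        simp only [he', Bool.false_eq_true, reduceIte]
        constructor
        · intro h; exact absurd h (by omega)
        · rintro ⟨ha, hb⟩
          rw [hlen] at ha
          rw [hstep w (by omega) ha] at hb
          simp [pvAllEven, he'] at hb

-- B's loop, characterized against an already-processed prefix p
theorem pvB_loop (w : Nat) : ∀ (xs : List Int) (p : List Int) (c : Int),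
    xs.foldl (fun (st : Int × Int) x =>
      ((if (if PySem.Int.mod x 2 == 0 then st.2 + 1 else 0) ≥ (w : Int) then st.1 + 1 else st.1),
       (if PySem.Int.mod x 2 == 0 then st.2 + 1 else 0))) (c, (pvRun p : Int))
    = (c + ((List.range xs.length).countP (fun j => w ≤ pvRun (p ++ xs.take (j + 1)))
        : Int), (pvRun (p ++ xs) : Int)) := by
  intro xs
  induction xs with
  | nil => intro p c; simp
  | cons x xs ih =>
      intro p c
      simp only [List.foldl_cons]
      have hs : (if PySem.Int.mod x 2 == 0 then (pvRun p : Int) + 1 else 0)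
          = ((pvRun (p ++ [x]) : Nat) : Int) := by
        rw [pvRun_append_singleton]
        by_cases he : PySem.Int.mod x 2 == 0 <;> simp [pvEven]
      rw [hs]
      have hc : (if ((pvRun (p ++ [x]) : Nat) : Int) ≥ (w : Int) then c + 1 else c)
          = c + (if w ≤ pvRun (p ++ [x]) then (1:Int) else 0) := by
        by_cases h : w ≤ pvRun (p ++ [x])
        · rw [if_pos h, if_pos (by exact_mod_cast h)]
        · rw [if_neg h, if_neg (by intro hc2; exact h (by exact_mod_cast hc2)), add_zero]
      rw [hc, ih (p ++ [x])]
      simp only [Prod.mk.injEq]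
      refine ⟨?_, by simp [List.append_assoc]⟩
      simp only [List.length_cons, List.range_succ_eq_map, List.countP_cons, List.countP_map]
      have hPQ : List.countP ((fun j => decide (w ≤ pvRun (p ++ (x :: xs).take (j + 1)))) ∘ Nat.succ)
            (List.range xs.length)
          = List.countP (fun j => decide (w ≤ pvRun ((p ++ [x]) ++ xs.take (j + 1))))
            (List.range xs.length) := by
        apply List.countP_congr
        intro a _
        simp [List.take_succ_cons, List.append_assoc]
      rw [hPQ]
      push_cast
      by_cases h : w ≤ pvRun (p ++ [x]) <;> simp [h, List.take_succ_cons] <;> ring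

-- counting windows by their last position equals counting them by their start
theorem pvReindex (w : Nat) (hw : 0 < w) (P : Nat → Bool) : ∀ (n : Nat),
    (List.range n).countP (fun j => decide (w ≤ j + 1) && P (j + 1 - w))
    = (List.range (n + 1 - w)).countP P := by
  intro n
  induction n with
  | zero => simp [Nat.sub_eq_zero_of_le hw]
  | succ n ih =>
      rw [List.range_succ, List.countP_append, ih]
      by_cases h : w ≤ n + 1
      · have h2 : n + 1 + 1 - w = (n + 1 - w) + 1 := by omega
        rw [h2, List.range_succ, List.countP_append]
        simp [h]
      · have h2 : n + 1 + 1 - w = 0 := by omega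
        have h3 : n + 1 - w = 0 := by omega
        rw [h2, h3]
        simp [h]

theorem pvB_eq (number : List Int) (w : Nat) (hw : 0 < w) :
    count_even_subarrays_alt number (w : Int)
    = ((List.range (number.length + 1 - w)).countP
        (fun i => pvAllEven ((number.drop i).take w)) : Int) := by
  unfold count_even_subarrays_alt
  rw [if_neg (by exact_mod_cast Nat.not_succ_le_zero (w-1) ∘ fun h => by omega)]
  have h0 : ((0 : Int), (0 : Int)) = ((0 : Int), ((pvRun [] : Nat) : Int)) := by simp [pvRun]
  rw [h0]
  rw [show (fun (st : Int × Int) x =>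
      let streak := if PySem.Int.mod x 2 == 0 then st.2 + 1 else 0
      (if streak ≥ ((w : Nat) : Int) then st.1 + 1 else st.1, streak))
    = (fun (st : Int × Int) x =>
      ((if (if PySem.Int.mod x 2 == 0 then st.2 + 1 else 0) ≥ ((w : Nat) : Int) then st.1 + 1 else st.1),
       (if PySem.Int.mod x 2 == 0 then st.2 + 1 else 0))) from rfl]
  rw [pvB_loop w number [] 0]
  simp only [List.nil_append, zero_add]
  congr 1
  rw [← pvReindex w hw]
  apply List.countP_congr
  intro j hj
  have hjn : j < number.length := List.mem_range.mp hj
  have hlen : (number.take (j+1)).length = j + 1 := by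
    rw [List.length_take]; omega
  simp only [decide_eq_true_eq, Bool.and_eq_true]
  rw [pvRun_ge_iff w hw, hlen]
  by_cases hcase : w ≤ j + 1
  · have hdt : (number.take (j+1)).drop (j + 1 - w) = (number.drop (j + 1 - w)).take w := by
      rw [List.drop_take]; congr 1; omega
    rw [hdt]
  · constructor
    · rintro ⟨h1, _⟩; exact absurd h1 hcase
    · rintro ⟨h1, _⟩; exact absurd h1 hcase

-- ===== VERDICT (by name: the statement is the Claim_ definition above) =====
theorem count_even_subarrays_spec : Claim_equal_count_even_subarrays := by
  intro number ws _
  unfold Spec_count_even_subarrays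
  by_cases hws : ws ≤ 0
  · rw [pvA_nonpos number ws hws]
    simp [count_even_subarrays_alt, hws]
  · have hpos : 0 < ws := lt_of_not_ge hws
    obtain ⟨w, rfl⟩ : ∃ w : Nat, ws = (w : Int) := ⟨ws.toNat, (Int.toNat_of_nonneg (le_of_lt hpos)).symm⟩
    have hw : 0 < w := by exact_mod_cast hpos
    rw [pvA_eq number w hw, pvB_eq number w hw]
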